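-- pv_equiv track=rewrite | github.com/nasa/hybridq | hybridq/modules/hybridq_architecture/hybridq_architecture/google/sycamore.py | layout
-- ===== SOURCE A (Python) =====
-- def layout(n_rows: int, n_cols: int) -> list[tuple[int, int]]:
--     """
--     Generate a Sycamore layout for a given number of rows and columns.
--
--     Parameters
--     ----------
--     n_rows: int
--         Number of rows.
--     n_cols: int
--         Number of columns.
--
--     Returns
--     -------
--     list[tuple[int, int]]
--         A list of qubits.
--     """
--
--     # Get limits
--     x_min = (n_cols + (n_cols % 2)) // 2 - 1
--     x_max = (n_rows + (n_rows % 2)) // 2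
--     y_min = 0
--     y_max = (n_rows + n_cols) // 2
--
--     # Generate sycamore layout
--     layout = [
--         (x, y) for x in range(-x_min, x_max) for y in range(-y_min, y_max)
--     ]
--     layout = [(x, y) for x, y in layout if 0 <= y - x < n_cols]
--     layout = [(x, y) for x, y in layout if 0 <= y + x < n_rows]
--
--     # Shift
--     layout = [(y, x + x_min) for x, y in layout]
--
--     # Check
--     assert (len(layout) == n_rows * (n_cols // 2) + (n_cols % 2) *
--             ((n_rows // 2) + (n_rows % 2)))
--
--     # Return layout
--     return sorted(layout)
-- ===== SOURCE B (Python) =====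
-- def layout(n_rows: int, n_cols: int) -> list[tuple[int, int]]:
--     # Change of variables u = y - x, v = y + x: the two diagonal-band filters
--     # of the original become plain range bounds 0 <= u < n_cols, 0 <= v < n_rows
--     # with a parity skip ((u+v) must be even for integer x, y), so no candidate
--     # box is generated and no inequality filtering happens.
--     x_min = (n_cols + n_cols % 2) // 2 - 1
--     pts = []
--     for u in range(n_cols):
--         for v in range(n_rows):
--             if (u + v) % 2:
--                 continue
--             pts.append(((u + v) // 2, (v - u) // 2 + x_min))
--     assert (len(pts) == n_rows * (n_cols // 2) + (n_cols % 2) *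
--             ((n_rows // 2) + (n_rows % 2)))
--     return sorted(pts)
-- ===== Notes on version B (the rewrite author's own statement) =====
-- stated objective: alternative
-- what changed: B changes variables to u = y - x, v = y + x, so the two diagonal-band inequality filters of A become the plain loop bounds 0 <= u < n_cols, 0 <= v < n_rows with a parity skip; it enumerates that (u,v) rectangle directly instead of generating and filtering A's candidate box, keeping the same assert and final sort.
import Mathlib
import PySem

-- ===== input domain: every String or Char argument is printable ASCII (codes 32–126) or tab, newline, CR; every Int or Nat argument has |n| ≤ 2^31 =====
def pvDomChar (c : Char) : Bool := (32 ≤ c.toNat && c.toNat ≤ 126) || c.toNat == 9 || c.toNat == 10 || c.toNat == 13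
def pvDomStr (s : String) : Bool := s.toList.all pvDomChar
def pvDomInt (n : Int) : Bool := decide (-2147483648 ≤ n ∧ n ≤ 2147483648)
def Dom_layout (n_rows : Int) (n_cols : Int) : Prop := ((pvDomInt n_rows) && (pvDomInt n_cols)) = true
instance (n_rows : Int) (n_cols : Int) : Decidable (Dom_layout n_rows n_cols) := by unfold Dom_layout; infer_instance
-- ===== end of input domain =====

-- B enumerates the rotated coordinates u = y - x, v = y + x over plain ranges with a parity
-- skip, instead of generating and filtering A's candidate box; same assert and final sort.

-- the comparator both ports hand to the sort (Python's tuple order on int pairs)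
def pvLeb (a b : Int × Int) : Bool :=
  decide (a.1 < b.1) || (decide (a.1 = b.1) && decide (a.2 ≤ b.2))

-- ===== PORT A =====
def layout (n_rows : Int) (n_cols : Int) : List (Int × Int) :=
  let x_min := PySem.Int.floordiv (n_cols + PySem.Int.mod n_cols 2) 2 - 1
  let x_max := PySem.Int.floordiv (n_rows + PySem.Int.mod n_rows 2) 2
  let y_min : Int := 0
  let y_max := PySem.Int.floordiv (n_rows + n_cols) 2
  let l0 := (PySem.List.pyRange (-x_min) x_max 1).flatMap
      (fun x => (PySem.List.pyRange (-y_min) y_max 1).map (fun y => (x, y)))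
  let l1 := l0.filter (fun p => decide (0 ≤ p.2 - p.1) && decide (p.2 - p.1 < n_cols))
  let l2 := l1.filter (fun p => decide (0 ≤ p.2 + p.1) && decide (p.2 + p.1 < n_rows))
  let l3 := l2.map (fun p => (p.2, p.1 + x_min))
  -- the 'assert' raises exactly outside Pre_layout; those inputs are excluded
  -- Python's sorted() on int pairs: a stable sort by the total lexicographic order;
  -- List.mergeSort with that order is stable too, hence exact here.
  l3.mergeSort pvLeb

-- ===== PORT B =====
def layout_alt (n_rows : Int) (n_cols : Int) : List (Int × Int) :=
  let x_min := PySem.Int.floordiv (n_cols + PySem.Int.mod n_cols 2) 2 - 1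
  let pts := (PySem.List.pyRange 0 n_cols 1).flatMap (fun u =>
    ((PySem.List.pyRange 0 n_rows 1).filter
        (fun v => decide (PySem.Int.mod (u + v) 2 = 0))).map
      (fun v => (PySem.Int.floordiv (u + v) 2, PySem.Int.floordiv (v - u) 2 + x_min)))
  -- the 'assert' raises exactly outside Pre_layout; those inputs are excluded
  pts.mergeSort pvLeb

-- ===== PRECONDITION & SPEC =====
-- Pre_layout holds exactly where the assert succeeds (both programs return);
-- outside it both raise AssertionError.
def Pre_layout (n_rows : Int) (n_cols : Int) : Prop :=
  (0 ≤ n_rows ∧ 0 ≤ n_cols) ∨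
  n_rows * PySem.Int.floordiv n_cols 2
    + PySem.Int.mod n_cols 2 * (PySem.Int.floordiv n_rows 2 + PySem.Int.mod n_rows 2) = 0
instance (n_rows : Int) (n_cols : Int) : Decidable (Pre_layout n_rows n_cols) := by
  unfold Pre_layout; infer_instance
def pvWitness_layout : Int × Int := (4, 5)

def Spec_layout (n_rows : Int) (n_cols : Int) (out : List (Int × Int)) : Prop := out = layout_alt n_rows n_cols
instance (n_rows : Int) (n_cols : Int) (out : List (Int × Int)) : Decidable (Spec_layout n_rows n_cols out) := by unfold Spec_layout; infer_instance

-- ===== CLAIM (what is proved, stated in full; the proofs are below) =====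
def Claim_equal_layout : Prop := ∀ (n_rows : Int) (n_cols : Int), Dom_layout n_rows n_cols → Pre_layout n_rows n_cols → Spec_layout n_rows n_cols (layout n_rows n_cols)

-- ===== LEMMAS AND PROOFS =====

-- Python's lexicographic order on pairs of ints (non-strict form of pvLeb).
def pvLexLe (a b : Int × Int) : Prop := a.1 < b.1 ∨ (a.1 = b.1 ∧ a.2 ≤ b.2)

-- two permutation-equal lists sort to the same result under the total antisymmetric order
theorem pvMergeSort_eq_of_perm (xs ys : List (Int × Int)) (hp : xs.Perm ys) :
    xs.mergeSort pvLeb = ys.mergeSort pvLeb := by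
  have htrans : ∀ (a b c : Int × Int), pvLeb a b → pvLeb b c → pvLeb a c := fun a b c hab hbc => by
    simp only [pvLeb, Bool.or_eq_true, Bool.and_eq_true, decide_eq_true_eq] at hab hbc ⊢
    omega
  have htot : ∀ (a b : Int × Int), pvLeb a b || pvLeb b a := fun a b => by
    simp only [pvLeb, Bool.or_eq_true, Bool.and_eq_true, decide_eq_true_eq]
    omega
  have hpw : ∀ zs : List (Int × Int), (zs.mergeSort pvLeb).Pairwise pvLexLe := fun zs =>
    (List.pairwise_mergeSort htrans htot zs).imp (fun {a b} hab => by
      simp only [pvLeb, Bool.or_eq_true, Bool.and_eq_true, decide_eq_true_eq] at hab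
      simp only [pvLexLe]
      omega)
  refine List.Perm.eq_of_pairwise (le := pvLexLe) ?_ (hpw xs) (hpw ys) ?_
  · rintro ⟨a1, a2⟩ ⟨b1, b2⟩ _ _ h1 h2
    simp only [pvLexLe] at h1 h2
    simp only [Prod.mk.injEq]
    omega
  · exact (List.mergeSort_perm xs pvLeb).trans (hp.trans (List.mergeSort_perm ys pvLeb).symm)

-- floor-division / modulus in omega-friendly form
theorem pvFd2 (a b : Int) : PySem.Int.floordiv a b = Int.fdiv a b := rfl
theorem pvMd2 (a b : Int) : PySem.Int.mod a b = Int.fmod a b := rfl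
theorem pvFdE (a : Int) : Int.fdiv a 2 = a / 2 := by simp [Int.fdiv_eq_ediv]
theorem pvMdE (a : Int) : Int.fmod a 2 = a % 2 := by simp [Int.fmod_eq_emod]

-- A's list before sorting, and B's list before sorting
def pvLA (n_rows n_cols : Int) : List (Int × Int) :=
  ((((PySem.List.pyRange (-(PySem.Int.floordiv (n_cols + PySem.Int.mod n_cols 2) 2 - 1))
        (PySem.Int.floordiv (n_rows + PySem.Int.mod n_rows 2) 2) 1).flatMap
      (fun x => (PySem.List.pyRange (-(0:Int)) (PySem.Int.floordiv (n_rows + n_cols) 2) 1).map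
        (fun y => (x, y)))).filter
      (fun p => decide (0 ≤ p.2 - p.1) && decide (p.2 - p.1 < n_cols))).filter
      (fun p => decide (0 ≤ p.2 + p.1) && decide (p.2 + p.1 < n_rows))).map
      (fun p => (p.2, p.1 + (PySem.Int.floordiv (n_cols + PySem.Int.mod n_cols 2) 2 - 1)))

def pvLB (n_rows n_cols : Int) : List (Int × Int) :=
  (PySem.List.pyRange 0 n_cols 1).flatMap (fun u =>
    ((PySem.List.pyRange 0 n_rows 1).filter
        (fun v => decide (PySem.Int.mod (u + v) 2 = 0))).map
      (fun v => (PySem.Int.floordiv (u + v) 2,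
        PySem.Int.floordiv (v - u) 2 + (PySem.Int.floordiv (n_cols + PySem.Int.mod n_cols 2) 2 - 1))))

theorem pvLayoutA_eq (n_rows n_cols : Int) :
    layout n_rows n_cols = (pvLA n_rows n_cols).mergeSort pvLeb := rfl

theorem pvLayoutB_eq (n_rows n_cols : Int) :
    layout_alt n_rows n_cols = (pvLB n_rows n_cols).mergeSort pvLeb := rfl

theorem pvMemA (n_rows n_cols : Int) (p : Int × Int) :
    p ∈ pvLA n_rows n_cols ↔
      (0 ≤ p.1 - p.2 + ((n_cols + n_cols % 2) / 2 - 1) ∧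
       p.1 - p.2 + ((n_cols + n_cols % 2) / 2 - 1) < n_cols ∧
       0 ≤ p.1 + p.2 - ((n_cols + n_cols % 2) / 2 - 1) ∧
       p.1 + p.2 - ((n_cols + n_cols % 2) / 2 - 1) < n_rows) := by
  obtain ⟨a, b⟩ := p
  unfold pvLA
  simp only [pvFd2, pvMd2, pvFdE, pvMdE, neg_zero]
  set m : Int := (n_cols + n_cols % 2) / 2 - 1 with hm
  constructor
  · intro h
    rw [List.mem_map] at h
    obtain ⟨q, hq, hpq⟩ := h
    rw [List.mem_filter] at hq
    obtain ⟨hq, h34⟩ := hq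
    rw [List.mem_filter] at hq
    obtain ⟨hq, h12⟩ := hq
    rw [List.mem_flatMap] at hq
    obtain ⟨x, hx, hq⟩ := hq
    rw [List.mem_map] at hq
    obtain ⟨y, hy, rfl⟩ := hq
    rw [PySem.List.mem_pyRange_one] at hx hy
    simp only [Bool.and_eq_true, decide_eq_true_eq] at h12 h34
    simp only [Prod.mk.injEq] at hpq
    obtain ⟨rfl, hb⟩ := hpq
    omega
  · intro h
    refine List.mem_map.mpr ⟨(b - m, a), ?_, by simp⟩
    refine List.mem_filter.mpr ⟨List.mem_filter.mpr ⟨List.mem_flatMap.mpr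
      ⟨b - m, PySem.List.mem_pyRange_one.mpr (by omega),
        List.mem_map.mpr ⟨a, PySem.List.mem_pyRange_one.mpr (by omega), rfl⟩⟩, ?_⟩, ?_⟩
    · simp only [Bool.and_eq_true, decide_eq_true_eq]
      omega
    · simp only [Bool.and_eq_true, decide_eq_true_eq]
      omega

theorem pvMemB (n_rows n_cols : Int) (p : Int × Int) :
    p ∈ pvLB n_rows n_cols ↔
      (0 ≤ p.1 - p.2 + ((n_cols + n_cols % 2) / 2 - 1) ∧
       p.1 - p.2 + ((n_cols + n_cols % 2) / 2 - 1) < n_cols ∧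
       0 ≤ p.1 + p.2 - ((n_cols + n_cols % 2) / 2 - 1) ∧
       p.1 + p.2 - ((n_cols + n_cols % 2) / 2 - 1) < n_rows) := by
  obtain ⟨a, b⟩ := p
  unfold pvLB
  simp only [pvFd2, pvMd2, pvFdE, pvMdE]
  set m : Int := (n_cols + n_cols % 2) / 2 - 1 with hm
  constructor
  · intro h
    rw [List.mem_flatMap] at h
    obtain ⟨u, hu, h⟩ := h
    rw [List.mem_map] at h
    obtain ⟨v, hv, hpq⟩ := h
    rw [List.mem_filter] at hv
    obtain ⟨hv, hpar⟩ := hv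
    rw [PySem.List.mem_pyRange_one] at hu hv
    simp only [decide_eq_true_eq] at hpar
    simp only [Prod.mk.injEq] at hpq
    obtain ⟨ha, hb⟩ := hpq
    omega
  · intro h
    refine List.mem_flatMap.mpr ⟨a - b + m, PySem.List.mem_pyRange_one.mpr (by omega), ?_⟩
    refine List.mem_map.mpr ⟨a + b - m, List.mem_filter.mpr
      ⟨PySem.List.mem_pyRange_one.mpr (by omega), ?_⟩, ?_⟩
    · simp only [decide_eq_true_eq]
      omega
    · simp only [Prod.mk.injEq]
      omega

theorem pvNodupA (n_rows n_cols : Int) : (pvLA n_rows n_cols).Nodup := by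
  unfold pvLA
  apply List.Nodup.map
  · rintro ⟨a1, a2⟩ ⟨b1, b2⟩ h
    simp only [Prod.mk.injEq] at h ⊢
    omega
  · apply List.Nodup.filter
    apply List.Nodup.filter
    rw [List.nodup_flatMap]
    constructor
    · intro x _
      exact (PySem.List.nodup_pyRange_one _ _).map (fun y1 y2 h => by simpa using h)
    · refine (PySem.List.pairwise_lt_pyRange_one _ _).imp ?_
      intro x1 x2 hlt
      rw [Function.onFun, List.disjoint_left]
      intro q hq1 hq2
      simp only [List.mem_map] at hq1 hq2
      obtain ⟨y1, _, rfl⟩ := hq1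
      obtain ⟨y2, _, h⟩ := hq2
      simp only [Prod.mk.injEq] at h
      omega

theorem pvNodupB (n_rows n_cols : Int) : (pvLB n_rows n_cols).Nodup := by
  unfold pvLB
  rw [List.nodup_flatMap]
  constructor
  · intro u _
    refine List.Nodup.map_on ?_ ((PySem.List.nodup_pyRange_one _ _).filter _)
    intro v1 hv1 v2 hv2 h
    simp only [List.mem_filter, PySem.List.mem_pyRange_one, pvMd2, pvMdE,
      decide_eq_true_eq] at hv1 hv2
    simp only [pvFd2, pvFdE, Prod.mk.injEq] at h
    omega
  · refine (PySem.List.pairwise_lt_pyRange_one _ _).imp ?_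
    intro u1 u2 hlt
    rw [Function.onFun, List.disjoint_left]
    intro q hq1 hq2
    simp only [List.mem_map, List.mem_filter, PySem.List.mem_pyRange_one,
      decide_eq_true_eq] at hq1 hq2
    obtain ⟨v1, hv1, rfl⟩ := hq1
    obtain ⟨v2, hv2, h⟩ := hq2
    simp only [pvFd2, pvFdE, pvMd2, pvMdE, Prod.mk.injEq] at h hv1 hv2
    omega

theorem pvMain (n_rows n_cols : Int) : layout n_rows n_cols = layout_alt n_rows n_cols := by
  rw [pvLayoutA_eq, pvLayoutB_eq]
  apply pvMergeSort_eq_of_perm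
  rw [List.perm_ext_iff_of_nodup (pvNodupA n_rows n_cols) (pvNodupB n_rows n_cols)]
  intro p
  rw [pvMemA, pvMemB]

-- ===== VERDICT (by name: the statement is the Claim_ definition above) =====
theorem layout_spec : Claim_equal_layout := by
  intro n_rows n_cols _ _
  unfold Spec_layout
  exact pvMain n_rows n_cols
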